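-- pv_equiv track=rewrite | github.com/IES-Rafael-Alberti/ejercicios-u1-JoseLuis-S | src/ej28_1.py | comprobarNum
-- ===== SOURCE A (Python) =====
-- def comprobarNum(num: str) -> bool:
--     '''Comprueba que el numero introducido sea un numero y no un str
--
--     Args:
--         num (str): Valor del numero introducido
--
--     Returns:
--         bool: Retorna True si es un numero o False en caso de que no
--     '''
--     num = num.strip()
--
--     # Comprueba que el numero no tenga mas de 1 .- o que no tenga - en medio
--     if num.count('.') > 1 or num.count('-') > 1 or (num.count('-') == 1 and num[0] != '-'):
--         return False
--
--     for i in num: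
--         if i not in '0123456789.-':
--             return False
--
--     if num == '-' or num == '.':
--         return False
--
--     return True
-- ===== SOURCE B (Python) =====
-- def comprobarNum(num: str) -> bool:
--     '''Single pass over the stripped string instead of three count() scans plus a loop.'''
--     s = num.strip()
--     dots = 0
--     for i, c in enumerate(s):
--         if c != '.' and c != '-' and c not in '0123456789':
--             return False
--         if c == '.':
--             if dots >= 1:
--                 return False
--             dots += 1
--         elif c == '-' and i != 0:
--             return False
--     return s != '-' and s != '.'
-- ===== Notes on version B (the rewrite author's own statement) =====
-- stated objective: simpler
-- what changed: B replaces A's three separate count() scans plus a validation loop plus an indexing check with a single enumerate pass over the stripped string that tracks the dot count and rejects a misplaced dash by its index.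
import Mathlib
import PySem

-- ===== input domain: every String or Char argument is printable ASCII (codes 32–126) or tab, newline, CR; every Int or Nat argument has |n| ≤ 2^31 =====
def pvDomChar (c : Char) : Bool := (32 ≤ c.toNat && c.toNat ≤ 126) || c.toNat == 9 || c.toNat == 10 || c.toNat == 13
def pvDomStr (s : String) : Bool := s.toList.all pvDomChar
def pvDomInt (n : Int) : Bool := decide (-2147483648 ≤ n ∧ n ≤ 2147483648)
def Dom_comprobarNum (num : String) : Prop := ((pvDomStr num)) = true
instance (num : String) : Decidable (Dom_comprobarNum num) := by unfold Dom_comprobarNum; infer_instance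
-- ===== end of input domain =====

-- B fuses A's three count() scans and its validation loop into ONE indexed pass (simpler: one traversal, no pre-scans).

-- ===== PORT A =====
def comprobarNum (num : String) : Bool :=
  let cs := PySem.Chars.strip num.toList
  -- num.count('.') > 1 or num.count('-') > 1 or (num.count('-') == 1 and num[0] != '-')
  if PySem.Chars.count cs ['.'] > 1 || PySem.Chars.count cs ['-'] > 1 ||
     (PySem.Chars.count cs ['-'] == 1 && !(PySem.List.pyGet? cs 0 == some '-')) then false
  -- for i in num: if i not in '0123456789.-': return False
  else if !(cs.all fun c => PySem.Chars.isIn [c] "0123456789.-".toList) then false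
  -- if num == '-' or num == '.': return False
  else if cs == ['-'] || cs == ['.'] then false
  else true

-- ===== PORT B =====
-- the enumerate-loop of Source B: i is the index, dots the number of '.' seen so far
def pvAltLoop : List Char → Nat → Nat → Bool
  | [], _, _ => true
  | c :: rest, i, dots =>
    if c != '.' && c != '-' && !(PySem.Chars.isIn [c] "0123456789".toList) then false
    else if c == '.' then
      if dots ≥ 1 then false else pvAltLoop rest (i+1) (dots+1)
    else if c == '-' && i != 0 then false
    else pvAltLoop rest (i+1) dots

def comprobarNum_alt (num : String) : Bool :=
  let cs := PySem.Chars.strip num.toList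
  if pvAltLoop cs 0 0 then !(cs == ['-'] || cs == ['.']) else false

-- ===== PRECONDITION & SPEC =====
def Spec_comprobarNum (num : String) (out : Bool) : Prop := out = comprobarNum_alt num
instance (num : String) (out : Bool) : Decidable (Spec_comprobarNum num out) := by unfold Spec_comprobarNum; infer_instance

-- ===== CLAIM (what is proved, stated in full; the proofs are below) =====
def Claim_equal_comprobarNum : Prop := ∀ (num : String), Dom_comprobarNum num → Spec_comprobarNum num (comprobarNum num)

-- ===== LEMMAS AND PROOFS =====

lemma isIn_singleton (c : Char) (l : List Char) : PySem.Chars.isIn [c] l = l.contains c := by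
  rw [Bool.eq_iff_iff, PySem.Chars.isIn_iff_infix, List.singleton_infix_iff, List.contains_iff_mem]

-- Python's s.count(sub) for a one-character sub is the character count
lemma countGo_singleton (c : Char) : ∀ (fuel : Nat) (l : List Char) (acc : Nat),
    l.length ≤ fuel → PySem.Chars.count.go [c] fuel l acc = acc + l.count c := by
  intro fuel
  induction fuel with
  | zero => intro l acc h; cases l with
    | nil => simp [PySem.Chars.count.go]
    | cons a t => simp at h
  | succ n ih =>
    intro l acc h
    cases l with
    | nil => simp [PySem.Chars.count.go]
    | cons a t =>
      simp only [PySem.Chars.count.go]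
      by_cases hc : c = a
      · subst hc
        simp [List.isPrefixOf, ih t (acc+1) (by simpa using h), List.count_cons]
        omega
      · simp [List.isPrefixOf, beq_iff_eq, Ne.symm hc, ih t acc (by simpa using h), hc]

lemma count_singleton (cs : List Char) (c : Char) : PySem.Chars.count cs [c] = cs.count c := by
  simp [PySem.Chars.count, countGo_singleton c cs.length cs 0 le_rfl]

-- invariant of Source B's loop after the first character (i ≠ 0, at most one '.' seen)
lemma altLoop_tail : ∀ (cs : List Char) (i dots : Nat), i ≠ 0 → dots ≤ 1 →
    (pvAltLoop cs i dots = true ↔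
      (∀ c ∈ cs, c ∈ "0123456789.-".toList) ∧ cs.count '.' + dots ≤ 1 ∧ '-' ∉ cs) := by
  intro cs
  induction cs with
  | nil => intro i dots hi hd; simp [pvAltLoop]; omega
  | cons c rest ih =>
    intro i dots hi hd
    simp only [pvAltLoop, isIn_singleton]
    by_cases hdot : c = '.'
    · subst hdot
      by_cases h1 : dots ≥ 1
      · simp [h1, List.count_cons]
        intro _ h2
        omega
      · have hd0 : dots = 0 := by omega
        subst hd0
        simp [h1, ih (i+1) 1 (by omega) le_rfl, List.count_cons]
    · by_cases hdash : c = '-'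
      · subst hdash
        simp [hi, hdot]
      · by_cases hdig : c ∈ "0123456789".toList
        · have hmem : c ∈ "0123456789.-".toList := by
            simp at hdig ⊢; tauto
          simp [hdot, hdash, hdig, ih (i+1) dots (by omega) hd, List.count_cons,
                Ne.symm hdash, hmem]
          tauto
        · have hmem : c ∉ "0123456789.-".toList := by
            simp at hdig ⊢; tauto
          simp [hdot, hdash, hdig, hmem]
          simp at hdig
          tauto

-- characterisation of Source B's whole loop from the start
lemma altLoop_char (cs : List Char) :
    pvAltLoop cs 0 0 = true ↔
      (∀ c ∈ cs, c ∈ "0123456789.-".toList) ∧ cs.count '.' ≤ 1 ∧ cs.count '-' ≤ 1 ∧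
        (cs.count '-' = 1 → cs[0]? = some '-') := by
  cases cs with
  | nil => simp [pvAltLoop]
  | cons c rest =>
    simp only [pvAltLoop, isIn_singleton]
    by_cases hdot : c = '.'
    · subst hdot
      simp [altLoop_tail rest 1 1 (by omega) (by omega), List.count_cons,
            ← List.count_eq_zero]
      intro _ _
      omega
    · by_cases hdash : c = '-'
      · subst hdash
        simp [altLoop_tail rest 1 0 (by omega) (by omega), List.count_cons,
              ← List.count_eq_zero]
      · by_cases hdig : c ∈ "0123456789".toList
        · have hmem : c ∈ "0123456789.-".toList := by
            simp at hdig ⊢; tauto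
          simp [hdot, hdash, hdig, altLoop_tail rest 1 0 (by omega) (by omega),
                List.count_cons, Ne.symm hdash, Ne.symm hdot, hmem,
                ← List.count_eq_zero]
          have hcnt : List.count '-' rest = 0 ↔
              (List.count '-' rest ≤ 1 ∧ ¬ List.count '-' rest = 1) := by omega
          tauto
        · have hmem : c ∉ "0123456789.-".toList := by
            simp at hdig ⊢; tauto
          simp [hdot, hdash, hdig, hmem]
          simp at hdig
          tauto

-- characterisation of A's result on the stripped character list
lemma portA_char (cs : List Char) :
    ((if PySem.Chars.count cs ['.'] > 1 || PySem.Chars.count cs ['-'] > 1 ||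
        (PySem.Chars.count cs ['-'] == 1 && !(PySem.List.pyGet? cs 0 == some '-')) then false
      else if !(cs.all fun c => PySem.Chars.isIn [c] "0123456789.-".toList) then false
      else if cs == ['-'] || cs == ['.'] then false
      else true) = true) ↔
      ((∀ c ∈ cs, c ∈ "0123456789.-".toList) ∧ cs.count '.' ≤ 1 ∧ cs.count '-' ≤ 1 ∧
        (cs.count '-' = 1 → cs[0]? = some '-')) ∧ ¬(cs = ['-'] ∨ cs = ['.']) := by
  have hget : PySem.List.pyGet? cs (0 : Int) = cs[0]? := by
    simpa using PySem.List.pyGet?_natCast cs 0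
  simp only [count_singleton, isIn_singleton, hget]
  split_ifs with h1 h2 h3
  · simp at h1
    simp only [Bool.false_eq_true, false_iff]
    rintro ⟨⟨-, hc1, hc2, hc3⟩, -⟩
    rcases h1 with (h | h) | ⟨he, hn⟩
    · omega
    · omega
    · exact hn (hc3 he)
  · simp only [Bool.false_eq_true, false_iff]
    simp at h1 h2
    obtain ⟨c, hc, hnc⟩ := h2
    rintro ⟨⟨hall, -⟩, -⟩
    have := hall c hc
    simp at this hnc
    tauto
  · simp only [Bool.false_eq_true, false_iff]
    rintro ⟨-, hne⟩
    simp at h3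
    tauto
  · simp only [true_iff]
    simp at h1 h2 h3
    refine ⟨⟨?_, h1.1.1, h1.1.2, h1.2⟩, by tauto⟩
    intro c hc
    have := h2 c hc
    simp
    tauto

-- the two bodies agree on every character list
lemma key (cs : List Char) :
    (if PySem.Chars.count cs ['.'] > 1 || PySem.Chars.count cs ['-'] > 1 ||
        (PySem.Chars.count cs ['-'] == 1 && !(PySem.List.pyGet? cs 0 == some '-')) then false
      else if !(cs.all fun c => PySem.Chars.isIn [c] "0123456789.-".toList) then false
      else if cs == ['-'] || cs == ['.'] then false
      else true)
    = (if pvAltLoop cs 0 0 then !(cs == ['-'] || cs == ['.']) else false) := by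
  rw [Bool.eq_iff_iff, portA_char]
  by_cases hb : pvAltLoop cs 0 0 = true
  · have hP := (altLoop_char cs).mp hb
    simp [hb]
    intro _ _
    exact ⟨fun c hc => by simpa using hP.1 c hc, hP.2.1, hP.2.2.1, hP.2.2.2⟩
  · simp [hb]
    intro h1 h2 h3 h4 _
    exact absurd ((altLoop_char cs).mpr
      ⟨fun c hc => by simpa using h1 c hc, h2, h3, h4⟩) hb

-- ===== VERDICT (by name: the statement is the Claim_ definition above) =====
theorem comprobarNum_spec : Claim_equal_comprobarNum := by
  intro num _
  unfold Spec_comprobarNum comprobarNum comprobarNum_alt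
  exact key (PySem.Chars.strip num.toList)
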